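/- GENERATED by mk_final_copies.py from the proof of the farm's unit `compute_twiddle_factors` (farm:compute_twiddle_factors.1: Lemmas.lean) as the
   re-elaboration sweep compiled it — do not edit. -/
import Asan.CheckWalk
import Vorbis.Spec.Units.compute_twiddle_factors

open X86 X86.User Asan Vorbis Vorbis.Spec

set_option maxRecDepth 4000
set_option maxHeartbeats 4000000

namespace Vorbis.Spec.compute_twiddle_factors

/-- `sar r32, s` of a non-negative 32-bit value, as stored in a 4-byte slot: the division by `2 ^ s`. -/
theorem sar32_toNat (x : BitVec 32) (s : Nat) (h : x.toNat < 2 ^ 31) : (x.sshiftRight s).toNat = x.toNat / 2 ^ s := by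
  have hm : x.msb = false := by
    rw [BitVec.msb_eq_decide]
    simp only [decide_eq_false_iff_not, Nat.not_le]
    omega
  rw [BitVec.toNat_sshiftRight_of_msb_false hm, Nat.shiftRight_eq_div_pow]

/-- the low half of a small number in a register -/
theorem part32_ofNat (j : Nat) (h : j < 2 ^ 31) : (Word.part .w32 (UInt64.ofNat j)).toNat = j := by
  rw [part32_toNat, UInt64.toNat_ofNat']
  omega

/-- `movsxd` of a small non-negative counter is the counter. -/
theorem sext_ofNat (j : Nat) (h : j < 2 ^ 31) :
    Word.ofBV (BitVec.signExtend 64 (Word.part .w32 (UInt64.ofNat j))) = UInt64.ofNat j := by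
  apply UInt64.toNat_inj.mp
  rw [toNat_sext32 _ (by rw [part32_ofNat j h]; exact h), part32_ofNat j h, UInt64.toNat_ofNat']
  omega

/-- The signed 32-bit comparison of the loop tests, for a small counter against a small bound. -/
theorem lt_of_cmp (k m : Nat) (hk : k < 2 ^ 31) (hm : m < 2 ^ 31) :
    (Word.part .w32 (UInt64.ofNat k)).toInt < (BitVec.ofNat 32 m).toInt ↔ k < m := by
  rw [toInt_of_lt _ (by rw [part32_ofNat k hk]; exact hk), part32_ofNat k hk,
    toInt_of_lt _ (by rw [toNat_ofNat32 m (by omega)]; exact hm), toNat_ofNat32 m (by omega)]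
  omega

/-- `add r32, c` on a small counter (`++k`, `k2 += 2`): no wrap, and the upper half of the register is 0. -/
theorem add32_ofNat (j c : Nat) (h : j + c < 2 ^ 31) :
    Word.ofBV (Word.part .w32 (UInt64.ofNat j) + BitVec.ofNat 32 c) = UInt64.ofNat (j + c) := by
  apply UInt64.toNat_inj.mp
  rw [Vorbis.toNat_ofBV32, BitVec.toNat_add, part32_ofNat j (by omega), BitVec.toNat_ofNat, UInt64.toNat_ofNat']
  omega

/-- **The frame of `compute_twiddle_factors` between two instructions of its body** (`rsp` after `sub rsp, 48H`, i.e. the entry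
stack pointer minus 120): the code is intact, only the footprint was written and no shadow byte, the return address and the six
saved registers are in their slots, and so are the spilled arguments `n` (d[rsp+0CH]), `A`, `B`, `C` (q[rsp+10H / 18H / 20H]),
`n4` (d[rsp+38H]) and `n8` (d[rsp+3CH]); DF = 0 and the MXCSR masks are set. The two doubles at q[rsp+28H], q[rsp+30H] are opaque. -/
structure TwFrame (u₀ u : State) (ret : Word) (N : Nat) (s : State) : Prop where
  /-- the steady stack pointer of the body -/
  rsp : s.reg .rsp = u.reg .rsp - 120
  /-- the image's text is unchanged -/
  eq : Mem.EqOn Vorbis.L.textLo Vorbis.L.textHi u₀.mem s.mem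
  /-- only the footprint was written -/
  same : Mem.SameExcept [⟨(u.reg .rsp).toNat - 160, (u.reg .rsp).toNat⟩,
      ⟨(u.reg .rsi).toNat, (u.reg .rsi).toNat + 2 * N⟩,
      ⟨(u.reg .rdx).toNat, (u.reg .rdx).toNat + 2 * N⟩,
      ⟨(u.reg .rcx).toNat, (u.reg .rcx).toNat + N⟩] u.mem s.mem
  /-- no shadow byte was written -/
  un : ShadowUntouched u.mem s.mem
  /-- the return address -/
  s0 : UInt64.ofNat (s.mem.readLE (u.reg .rsp) 8) = ret
  /-- the saved r15 -/
  s1 : UInt64.ofNat (s.mem.readLE (u.reg .rsp - 8) 8) = u.reg .r15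
  /-- the saved r14 -/
  s2 : UInt64.ofNat (s.mem.readLE (u.reg .rsp - 16) 8) = u.reg .r14
  /-- the saved r13 -/
  s3 : UInt64.ofNat (s.mem.readLE (u.reg .rsp - 24) 8) = u.reg .r13
  /-- the saved r12 -/
  s4 : UInt64.ofNat (s.mem.readLE (u.reg .rsp - 32) 8) = u.reg .r12
  /-- the saved rbp -/
  s5 : UInt64.ofNat (s.mem.readLE (u.reg .rsp - 40) 8) = u.reg .rbp
  /-- the saved rbx -/
  s6 : UInt64.ofNat (s.mem.readLE (u.reg .rsp - 48) 8) = u.reg .rbx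
  /-- the spilled `A` -/
  sA : UInt64.ofNat (s.mem.readLE (u.reg .rsp - 104) 8) = u.reg .rsi
  /-- the spilled `B` -/
  sB : UInt64.ofNat (s.mem.readLE (u.reg .rsp - 96) 8) = u.reg .rdx
  /-- the spilled `C` -/
  sC : UInt64.ofNat (s.mem.readLE (u.reg .rsp - 88) 8) = u.reg .rcx
  /-- the spilled `n` -/
  sn : s.mem.readLE (u.reg .rsp - 108) 4 = N
  /-- `n4 = n >> 2` -/
  sn4 : s.mem.readLE (u.reg .rsp - 64) 4 = N / 4
  /-- `n8 = n >> 3` -/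
  sn8 : s.mem.readLE (u.reg .rsp - 60) 4 = N / 8
  /-- the direction flag -/
  df : s.flags .df = false
  /-- the SSE exception masks -/
  mx : s.mxcsr &&& 0x1F80 = 0x1F80

/-- **The frame is kept by every stretch of the body**: what it writes are the scratch part of the stack (the callees' frames and
return addresses below `rsp + 0CH`, the two doubles at `[rsp+28H, rsp+38H)`) and floats of `A`, `B`, `C`, which are off the stack
(`hA`, `hB`, `hC`: from `LiveBytes.where_`). -/
theorem TwFrame.transfer {u₀ u : State} {ret : Word} {N : Nat} {s s' : State} (hb : TwFrame u₀ u ret N s)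
    (hroom : 0x700000 + 160 ≤ (u.reg .rsp).toNat) (htop : (u.reg .rsp).toNat + 8 ≤ 0x800000)
    (hA : (u.reg .rsp).toNat + 8 ≤ (u.reg .rsi).toNat ∨ (u.reg .rsi).toNat + 2 * N ≤ (u.reg .rsp).toNat - 160)
    (hB : (u.reg .rsp).toNat + 8 ≤ (u.reg .rdx).toNat ∨ (u.reg .rdx).toNat + 2 * N ≤ (u.reg .rsp).toNat - 160)
    (hC : (u.reg .rsp).toNat + 8 ≤ (u.reg .rcx).toNat ∨ (u.reg .rcx).toNat + N ≤ (u.reg .rsp).toNat - 160)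
    (hAhi : (u.reg .rsi).toNat + 2 * N ≤ 0xC00000) (hBhi : (u.reg .rdx).toNat + 2 * N ≤ 0xC00000)
    (hChi : (u.reg .rcx).toNat + N ≤ 0xC00000)
    (hrsp : s'.reg .rsp = u.reg .rsp - 120)
    (heq : Mem.EqOn Vorbis.L.textLo Vorbis.L.textHi u₀.mem s'.mem)
    (hstep : Mem.SameExcept [⟨(u.reg .rsp).toNat - 160, (u.reg .rsp).toNat - 108⟩,
      ⟨(u.reg .rsp).toNat - 80, (u.reg .rsp).toNat - 64⟩,
      ⟨(u.reg .rsi).toNat, (u.reg .rsi).toNat + 2 * N⟩,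
      ⟨(u.reg .rdx).toNat, (u.reg .rdx).toNat + 2 * N⟩,
      ⟨(u.reg .rcx).toNat, (u.reg .rcx).toNat + N⟩] s.mem s'.mem)
    (hdf : s'.flags .df = false) (hmx : s'.mxcsr &&& 0x1F80 = 0x1F80) : TwFrame u₀ u ret N s' := by
  obtain ⟨_, _, hsame, hun, hs0, hs1, hs2, hs3, hs4, hs5, hs6, hsA, hsB, hsC, hsn, hsn4, hsn8, _, _⟩ := hb
  refine ⟨hrsp, heq, ?_, ?_, ?_, ?_, ?_, ?_, ?_, ?_, ?_, ?_, ?_, ?_, ?_, ?_, ?_, hdf, hmx⟩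
  · u_same
  · unfold ShadowUntouched at hun ⊢
    refine hun.step_same hstep ?_
    intro w hw
    simp only [List.mem_cons, List.not_mem_nil, or_false] at hw
    rcases hw with rfl | rfl | rfl | rfl | rfl
    all_goals dsimp only
    all_goals omega
  · u_frame hs0
  · u_frame hs1
  · u_frame hs2
  · u_frame hs3
  · u_frame hs4
  · u_frame hs5
  · u_frame hs6
  · u_frame hsA
  · u_frame hsB
  · u_frame hsC
  · u_frame hsn
  · u_frame hsn4
  · u_frame hsn8

/-- The frame at a state with the same memory (the loop tests and the `mov r32, 0` between the loops store nothing). -/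
theorem TwFrame.of_mem_eq {u₀ u : State} {ret : Word} {N : Nat} {s s' : State} (hb : TwFrame u₀ u ret N s)
    (hmem : s'.mem = s.mem) (hrsp : s'.reg .rsp = u.reg .rsp - 120)
    (hdf : s'.flags .df = false) (hmx : s'.mxcsr &&& 0x1F80 = 0x1F80) : TwFrame u₀ u ret N s' := by
  obtain ⟨_, heq, hsame, hun, hs0, hs1, hs2, hs3, hs4, hs5, hs6, hsA, hsB, hsC, hsn, hsn4, hsn8, _, _⟩ := hb
  rw [← hmem] at heq hsame hun hs0 hs1 hs2 hs3 hs4 hs5 hs6 hsA hsB hsC hsn hsn4 hsn8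
  exact ⟨hrsp, heq, hsame, hun, hs0, hs1, hs2, hs3, hs4, hs5, hs6, hsA, hsB, hsC, hsn, hsn4, hsn8, hdf, hmx⟩

/-! ### What one stretch of the body writes: inside the scratch windows of `TwFrame.transfer` -/

/-- A call of `sin` / `cos`: the return address at `[rsp - 8]` and the callee's 32 bytes below it. -/
theorem step_call {u : State} {N : Nat} {m0 m1 : Mem} {x : Nat}
    (hroom : 0x700000 + 160 ≤ (u.reg .rsp).toNat) (htop : (u.reg .rsp).toNat + 8 ≤ 0x800000)
    (hs : Mem.SameExcept [⟨(u.reg .rsp - 128).toNat - 32, (u.reg .rsp - 128).toNat⟩] (m0.writeLE (u.reg .rsp - 128) 8 x) m1) :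
    Mem.SameExcept [⟨(u.reg .rsp).toNat - 160, (u.reg .rsp).toNat - 108⟩,
      ⟨(u.reg .rsp).toNat - 80, (u.reg .rsp).toNat - 64⟩,
      ⟨(u.reg .rsi).toNat, (u.reg .rsi).toNat + 2 * N⟩,
      ⟨(u.reg .rdx).toNat, (u.reg .rdx).toNat + 2 * N⟩,
      ⟨(u.reg .rcx).toNat, (u.reg .rcx).toNat + N⟩] m0 m1 := by
  u_same

/-- The head of loop 1 to the first call of `cos`: the two doubles spilled at `[rsp+28H]`, `[rsp+30H]`, then the call. -/
theorem step_spill_call {u : State} {N : Nat} {m0 m1 : Mem} {x y z : Nat}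
    (hroom : 0x700000 + 160 ≤ (u.reg .rsp).toNat) (htop : (u.reg .rsp).toNat + 8 ≤ 0x800000)
    (hs : Mem.SameExcept [⟨(u.reg .rsp - 128).toNat - 32, (u.reg .rsp - 128).toNat⟩]
      (((m0.writeLE (u.reg .rsp - 80) 8 x).writeLE (u.reg .rsp - 72) 8 y).writeLE (u.reg .rsp - 128) 8 z) m1) :
    Mem.SameExcept [⟨(u.reg .rsp).toNat - 160, (u.reg .rsp).toNat - 108⟩,
      ⟨(u.reg .rsp).toNat - 80, (u.reg .rsp).toNat - 64⟩,
      ⟨(u.reg .rsi).toNat, (u.reg .rsi).toNat + 2 * N⟩,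
      ⟨(u.reg .rdx).toNat, (u.reg .rdx).toNat + 2 * N⟩,
      ⟨(u.reg .rcx).toNat, (u.reg .rcx).toNat + N⟩] m0 m1 := by
  u_same

/-- A checked store of one float into `A`, `B` or `C` (the return address of the check call first), then a call of `sin` / `cos`. -/
theorem step_store_call {u : State} {N : Nat} {m0 m1 : Mem} {a : Word} {x y z : Nat}
    (hroom : 0x700000 + 160 ≤ (u.reg .rsp).toNat) (htop : (u.reg .rsp).toNat + 8 ≤ 0x800000)
    (hhi : a.toNat + 4 < 2 ^ 64)
    (hin : ((u.reg .rsi).toNat ≤ a.toNat ∧ a.toNat + 4 ≤ (u.reg .rsi).toNat + 2 * N) ∨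
      ((u.reg .rdx).toNat ≤ a.toNat ∧ a.toNat + 4 ≤ (u.reg .rdx).toNat + 2 * N) ∨
      ((u.reg .rcx).toNat ≤ a.toNat ∧ a.toNat + 4 ≤ (u.reg .rcx).toNat + N))
    (hs : Mem.SameExcept [⟨(u.reg .rsp - 128).toNat - 32, (u.reg .rsp - 128).toNat⟩]
      (((m0.writeLE (u.reg .rsp - 128) 8 x).writeLE a 4 y).writeLE (u.reg .rsp - 128) 8 z) m1) :
    Mem.SameExcept [⟨(u.reg .rsp).toNat - 160, (u.reg .rsp).toNat - 108⟩,
      ⟨(u.reg .rsp).toNat - 80, (u.reg .rsp).toNat - 64⟩,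
      ⟨(u.reg .rsi).toNat, (u.reg .rsi).toNat + 2 * N⟩,
      ⟨(u.reg .rdx).toNat, (u.reg .rdx).toNat + 2 * N⟩,
      ⟨(u.reg .rcx).toNat, (u.reg .rcx).toNat + N⟩] m0 m1 := by
  u_same

/-- A checked store of one float into `A`, `B` or `C` (the return address of the check call first): the last store of a loop body. -/
theorem step_store {u : State} {N : Nat} {m0 : Mem} {a : Word} {x y : Nat}
    (hroom : 0x700000 + 160 ≤ (u.reg .rsp).toNat) (htop : (u.reg .rsp).toNat + 8 ≤ 0x800000)
    (hhi : a.toNat + 4 < 2 ^ 64)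
    (hin : ((u.reg .rsi).toNat ≤ a.toNat ∧ a.toNat + 4 ≤ (u.reg .rsi).toNat + 2 * N) ∨
      ((u.reg .rdx).toNat ≤ a.toNat ∧ a.toNat + 4 ≤ (u.reg .rdx).toNat + 2 * N) ∨
      ((u.reg .rcx).toNat ≤ a.toNat ∧ a.toNat + 4 ≤ (u.reg .rcx).toNat + N)) :
    Mem.SameExcept [⟨(u.reg .rsp).toNat - 160, (u.reg .rsp).toNat - 108⟩,
      ⟨(u.reg .rsp).toNat - 80, (u.reg .rsp).toNat - 64⟩,
      ⟨(u.reg .rsi).toNat, (u.reg .rsi).toNat + 2 * N⟩,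
      ⟨(u.reg .rdx).toNat, (u.reg .rdx).toNat + 2 * N⟩,
      ⟨(u.reg .rcx).toNat, (u.reg .rcx).toNat + N⟩] m0 ((m0.writeLE (u.reg .rsp - 128) 8 x).writeLE a 4 y) := by
  u_same

end Vorbis.Spec.compute_twiddle_factors
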